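-- pv_equiv track=rewrite | github.com/jjhs0819-ops/samba-wave | backend/backend/api/v1/routers/samba/proxy/ai_tags.py | _has_overlap_suffix
-- ===== SOURCE A (Python) =====
-- def _has_overlap_suffix(word: str, existing: list[str], min_suffix: int = 2) -> bool:
--     """기존 SEO 키워드와 접미어가 겹치는지 확인.
--
--     예: 기존에 '로고티셔츠'가 있으면 '그래픽티셔츠'는 '티셔츠' 접미어 중복 → True
--     """
--     wl = word.lower()
--     for e in existing:
--         el = e.lower()
--         # 공통 접미어 검사 (뒤에서부터 매칭)
--         common = 0
--         for i in range(1, min(len(wl), len(el)) + 1):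
--             if wl[-i] == el[-i]:
--                 common = i
--             else:
--                 break
--         if common >= min_suffix and wl != el:
--             return True
--     return False
-- ===== SOURCE B (Python) =====
-- def _has_overlap_suffix(word: str, existing: list[str], min_suffix: int = 2) -> bool:
--     """Suffix-overlap check via a single fixed-length tail-slice comparison.
--
--     A word overlaps an existing word iff both (lowercased) are at least
--     min_suffix long, share their last min_suffix characters, and differ.
--     A non-positive min_suffix means any distinct word counts as an overlap.
--     """
--     wl = word.lower()
--     if min_suffix <= 0:
--         return any(wl != e.lower() for e in existing)
--     return any(
--         len(wl) >= min_suffix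
--         and len(el) >= min_suffix
--         and wl[-min_suffix:] == el[-min_suffix:]
--         and wl != el
--         for el in (e.lower() for e in existing)
--     )
-- ===== Notes on version B (the rewrite author's own statement) =====
-- stated objective: simpler
-- what changed: Replaces A's inner character-by-character longest-common-suffix accumulation loop with a single fixed-length tail-slice comparison per existing word (plus an explicit branch for non-positive min_suffix, where any distinct word overlaps).
import Mathlib
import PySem

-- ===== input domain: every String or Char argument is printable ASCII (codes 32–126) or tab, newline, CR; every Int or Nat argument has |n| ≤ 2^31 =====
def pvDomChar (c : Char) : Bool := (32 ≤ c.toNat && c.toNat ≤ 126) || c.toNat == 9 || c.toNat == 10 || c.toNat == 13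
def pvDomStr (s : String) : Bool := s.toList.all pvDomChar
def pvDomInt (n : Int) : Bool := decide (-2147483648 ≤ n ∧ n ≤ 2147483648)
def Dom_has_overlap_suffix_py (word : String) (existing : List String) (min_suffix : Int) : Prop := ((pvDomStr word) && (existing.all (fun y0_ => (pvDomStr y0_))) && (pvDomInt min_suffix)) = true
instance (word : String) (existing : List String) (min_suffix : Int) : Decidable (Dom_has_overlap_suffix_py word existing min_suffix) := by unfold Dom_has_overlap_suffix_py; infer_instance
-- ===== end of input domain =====

-- B replaces A's character-by-character longest-common-suffix accumulation with one
-- fixed-length tail-slice comparison per existing word (objective: simpler).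

-- ===== PORT A =====
-- A's inner loop 'for i in range(1, min(len(wl), len(el)) + 1): if wl[-i] == el[-i]: common = i
-- else: break'; comparing the pyGet? options is exact here since 1 ≤ i ≤ min of the lengths
-- keeps both negative indices in range (both sides are 'some').
def pvCommonA (wl el : List Char) (bound : Nat) (i : Nat) (common : Nat) : Nat :=
  if i > bound then common
  else if PySem.List.pyGet? wl (-(i : Int)) == PySem.List.pyGet? el (-(i : Int)) then
    pvCommonA wl el bound (i + 1) i
  else common
termination_by bound + 1 - i

-- A's outer 'for e in existing' loop with its early 'return True'.
def pvGoA (wl : String) (existing : List String) (min_suffix : Int) : Bool :=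
  match existing with
  | [] => false
  | e :: rest =>
    let el := PySem.Str.lower e
    let common := pvCommonA wl.toList el.toList (min wl.toList.length el.toList.length) 1 0
    if (common : Int) ≥ min_suffix ∧ wl ≠ el then true
    else pvGoA wl rest min_suffix

def has_overlap_suffix_py (word : String) (existing : List String) (min_suffix : Int) : Bool :=
  let wl := PySem.Str.lower word
  pvGoA wl existing min_suffix

-- ===== PORT B =====
def has_overlap_suffix_py_alt (word : String) (existing : List String) (min_suffix : Int) : Bool :=
  let wl := PySem.Str.lower word
  if min_suffix ≤ 0 then
    existing.any (fun e => decide (wl ≠ PySem.Str.lower e))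
  else
    existing.any (fun e =>
      decide ((wl.toList.length : Int) ≥ min_suffix) &&
      decide (((PySem.Str.lower e).toList.length : Int) ≥ min_suffix) &&
      (PySem.List.slice wl.toList (some (-min_suffix)) none
        == PySem.List.slice (PySem.Str.lower e).toList (some (-min_suffix)) none) &&
      decide (wl ≠ PySem.Str.lower e))

-- ===== PRECONDITION & SPEC =====
def Spec_has_overlap_suffix_py (word : String) (existing : List String) (min_suffix : Int) (out : Bool) : Prop := out = has_overlap_suffix_py_alt word existing min_suffix
instance (word : String) (existing : List String) (min_suffix : Int) (out : Bool) : Decidable (Spec_has_overlap_suffix_py word existing min_suffix out) := by unfold Spec_has_overlap_suffix_py; infer_instance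

-- ===== CLAIM (what is proved, stated in full; the proofs are below) =====
def Claim_equal_has_overlap_suffix_py : Prop := ∀ (word : String) (existing : List String) (min_suffix : Int), Dom_has_overlap_suffix_py word existing min_suffix → Spec_has_overlap_suffix_py word existing min_suffix (has_overlap_suffix_py word existing min_suffix)

-- ===== LEMMAS AND PROOFS =====

-- Invariant of A's inner loop (always entered as pvCommonA wl el bound i (i-1)): the result
-- reaches k iff k is already reached or k ≤ bound and every remaining position up to k matches.
theorem pvCommonA_ge_iff (wl el : List Char) (bound : Nat) (k : Nat) (i : Nat) (hi : 1 ≤ i) :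
    k ≤ pvCommonA wl el bound i (i - 1) ↔
      (k ≤ i - 1 ∨ (k ≤ bound ∧ ∀ j : Nat, i ≤ j → j ≤ k →
        PySem.List.pyGet? wl (-(j : Int)) = PySem.List.pyGet? el (-(j : Int)))) := by
  rw [pvCommonA]
  by_cases h : i > bound
  · simp only [if_pos h]
    constructor
    · intro hk; exact Or.inl hk
    · rintro (hk | ⟨hkb, _⟩)
      · exact hk
      · omega
  · simp only [if_neg h]
    by_cases heq : PySem.List.pyGet? wl (-(i : Int)) == PySem.List.pyGet? el (-(i : Int))
    · simp only [if_pos heq]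
      have heq' : PySem.List.pyGet? wl (-(i : Int)) = PySem.List.pyGet? el (-(i : Int)) :=
        beq_iff_eq.mp heq
      have IH := pvCommonA_ge_iff wl el bound k (i + 1) (by omega)
      have hre : (i + 1) - 1 = i := by omega
      rw [hre] at IH
      rw [IH]
      constructor
      · rintro (hk | ⟨hkb, hall⟩)
        · by_cases hk' : k ≤ i - 1
          · exact Or.inl hk'
          · refine Or.inr ⟨by omega, ?_⟩
            intro j hj1 hj2
            have : j = i := by omega
            subst this; exact heq'
        · by_cases hk' : k ≤ i - 1
          · exact Or.inl hk'
          · refine Or.inr ⟨hkb, ?_⟩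
            intro j hj1 hj2
            rcases Nat.eq_or_lt_of_le hj1 with he | hl
            · subst he; exact heq'
            · exact hall j hl hj2
      · rintro (hk | ⟨hkb, hall⟩)
        · exact Or.inl (by omega)
        · by_cases hk' : k ≤ i
          · exact Or.inl hk'
          · exact Or.inr ⟨hkb, fun j hj1 hj2 => hall j (by omega) hj2⟩
    · simp only [if_neg heq]
      constructor
      · intro hk; exact Or.inl hk
      · rintro (hk | ⟨hkb, hall⟩)
        · exact hk
        · by_cases hk' : k ≤ i - 1
          · exact hk'
          · exact absurd (beq_iff_eq.mpr (hall i (le_refl i) (by omega))) heq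
termination_by bound + 1 - i

-- A's longest-common-suffix count reaches kn ≥ 1 iff both lists are at least kn long
-- and their last kn elements (as tail drops) coincide.
theorem pvCommonA_char (wl el : List Char) (kn : Nat) (hk : 1 ≤ kn) :
    kn ≤ pvCommonA wl el (min wl.length el.length) 1 0 ↔
      (kn ≤ wl.length ∧ kn ≤ el.length ∧
        wl.drop (wl.length - kn) = el.drop (el.length - kn)) := by
  have H := pvCommonA_ge_iff wl el (min wl.length el.length) kn 1 (le_refl 1)
  simp only [Nat.sub_self] at H
  rw [H]
  constructor
  · rintro (h0 | ⟨hkb, hall⟩)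
    · omega
    · refine ⟨by omega, by omega, ?_⟩
      apply List.ext_getElem?
      intro m
      by_cases hm : m < kn
      · have hj1 : 1 ≤ kn - m := by omega
        have hj2 : kn - m ≤ kn := by omega
        have hp := hall (kn - m) hj1 hj2
        rw [PySem.List.pyGet?_neg_natCast wl (kn-m) hj1 (by omega),
            PySem.List.pyGet?_neg_natCast el (kn-m) hj1 (by omega)] at hp
        rw [List.getElem?_drop, List.getElem?_drop]
        have e1 : wl.length - kn + m = wl.length - (kn - m) := by omega
        have e2 : el.length - kn + m = el.length - (kn - m) := by omega
        rw [e1, e2, hp]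
      · rw [List.getElem?_drop, List.getElem?_drop]
        rw [List.getElem?_eq_none (by omega), List.getElem?_eq_none (by omega)]
  · rintro ⟨h1, h2, hd⟩
    refine Or.inr ⟨by omega, ?_⟩
    intro j hj1 hj2
    rw [PySem.List.pyGet?_neg_natCast wl j hj1 (by omega),
        PySem.List.pyGet?_neg_natCast el j hj1 (by omega)]
    have e1 : wl.length - j = wl.length - kn + (kn - j) := by omega
    have e2 : el.length - j = el.length - kn + (kn - j) := by omega
    rw [e1, e2, ← List.getElem?_drop, ← List.getElem?_drop, hd]

-- Per existing word, A's test (longest common suffix ≥ ms, distinct) equals B's test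
-- (both long enough, equal tail slices, distinct), for positive ms.
theorem elem_eq (wl el : String) (ms : Int) (hms : 1 ≤ ms) :
    (decide (((pvCommonA wl.toList el.toList (min wl.toList.length el.toList.length) 1 0 : Int) ≥ ms)
      ∧ wl ≠ el))
    = (decide ((wl.toList.length : Int) ≥ ms) &&
       decide ((el.toList.length : Int) ≥ ms) &&
       (PySem.List.slice wl.toList (some (-ms)) none
         == PySem.List.slice el.toList (some (-ms)) none) &&
       decide (wl ≠ el)) := by
  set kn : Nat := ms.toNat with hkn
  have hms' : ms = (kn : Int) := by omega
  have hk1 : 1 ≤ kn := by omega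
  rw [hms']
  have hchar := pvCommonA_char wl.toList el.toList kn hk1
  rw [PySem.List.slice_from_neg_natCast wl.toList kn (by omega),
      PySem.List.slice_from_neg_natCast el.toList kn (by omega)]
  by_cases hne : wl ≠ el
  · rw [Bool.decide_and, decide_eq_true hne, Bool.and_true, Bool.and_true]
    rw [Bool.eq_iff_iff]
    simp only [decide_eq_true_eq, Bool.and_eq_true, beq_iff_eq]
    constructor
    · intro h
      have h' : kn ≤ pvCommonA wl.toList el.toList (min wl.toList.length el.toList.length) 1 0 := by
        omega
      obtain ⟨h1, h2, h3⟩ := hchar.mp h'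
      exact ⟨⟨by omega, by omega⟩, h3⟩
    · rintro ⟨⟨c1, c2⟩, c3⟩
      have h' := hchar.mpr ⟨by omega, by omega, c3⟩
      omega
  · have heq : wl = el := not_not.mp hne
    subst heq
    simp

-- ===== VERDICT (by name: the statement is the Claim_ definition above) =====
theorem has_overlap_suffix_py_spec : Claim_equal_has_overlap_suffix_py := by
  intro word existing ms hdom
  clear hdom
  unfold Spec_has_overlap_suffix_py has_overlap_suffix_py has_overlap_suffix_py_alt
  by_cases hms : ms ≤ 0
  · simp only [if_pos hms]
    induction existing with
    | nil => rfl
    | cons e rest ih =>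
      simp only [pvGoA, List.any_cons]
      have hc : ((pvCommonA (PySem.Str.lower word).toList (PySem.Str.lower e).toList
          (min (PySem.Str.lower word).toList.length (PySem.Str.lower e).toList.length) 1 0 : Int) ≥ ms) := by
        have h0 : (0:Int) ≤ ((pvCommonA (PySem.Str.lower word).toList (PySem.Str.lower e).toList
          (min (PySem.Str.lower word).toList.length (PySem.Str.lower e).toList.length) 1 0 : Nat) : Int) :=
          Int.natCast_nonneg _
        omega
      by_cases hne : PySem.Str.lower word ≠ PySem.Str.lower e
      · rw [if_pos ⟨hc, hne⟩, decide_eq_true hne, Bool.true_or]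
      · rw [if_neg (fun hC => hne hC.2), ih, decide_eq_false hne, Bool.false_or]
  · simp only [if_neg hms]
    induction existing with
    | nil => rfl
    | cons e rest ih =>
      simp only [pvGoA, List.any_cons]
      rw [← ih]
      have he := elem_eq (PySem.Str.lower word) (PySem.Str.lower e) ms (by omega)
      by_cases hcond : ((pvCommonA (PySem.Str.lower word).toList (PySem.Str.lower e).toList
          (min (PySem.Str.lower word).toList.length (PySem.Str.lower e).toList.length) 1 0 : Int) ≥ ms)
          ∧ PySem.Str.lower word ≠ PySem.Str.lower e
      · rw [if_pos hcond, decide_eq_true hcond] at *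
        rw [← he, Bool.true_or]
      · rw [if_neg hcond]
        rw [decide_eq_false hcond] at he
        rw [← he, Bool.false_or]
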